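-- pv_equiv track=rewrite | github.com/hu-po/codelangexpo | 002-dfs/python/main.py | dfs
-- ===== SOURCE A (Python) =====
-- def dfs(size: int, target: int) -> bool:
--     if size == 0:
--         return False
--     st = [0]  # start with root
--     while st:
--         i = st.pop()
--         if i == target:
--             return True
--         l = 2 * i + 1
--         r = 2 * i + 2
--         if r < size:
--             st.append(r)  # push right first
--         if l < size:
--             st.append(l)  # then left
--     return False
-- ===== SOURCE B (Python) =====
-- def dfs(size: int, target: int) -> bool:
--     # Every index in [0, size) is reachable from the root of a complete
--     # binary heap laid out in an array, so reachability is a range check.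
--     return 0 <= target < size
-- ===== Notes on version B (the rewrite author's own statement) =====
-- stated objective: faster
-- what changed: Replaced the explicit-stack DFS over the implicit heap with the closed-form range check 0 <= target < size, since every index in [0,size) is reachable from the root.
-- intended difference: On size < 0 with target = 0 A returns True (its seed stack [0] pops the root of a heap that has no nodes) while B returns False, the intended answer since nothing is reachable in an empty or negative-size heap. — e.g. on dfs(-1, 0): A returns true, B returns false
import Mathlib
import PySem

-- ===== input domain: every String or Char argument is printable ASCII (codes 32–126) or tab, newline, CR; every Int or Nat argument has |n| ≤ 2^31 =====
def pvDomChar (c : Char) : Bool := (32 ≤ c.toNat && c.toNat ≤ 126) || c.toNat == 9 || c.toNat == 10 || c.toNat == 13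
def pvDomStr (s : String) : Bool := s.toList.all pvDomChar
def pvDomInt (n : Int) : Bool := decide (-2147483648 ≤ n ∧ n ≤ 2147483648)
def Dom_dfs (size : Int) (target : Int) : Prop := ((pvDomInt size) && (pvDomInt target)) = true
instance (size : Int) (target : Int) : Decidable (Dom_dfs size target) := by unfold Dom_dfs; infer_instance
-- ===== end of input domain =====

-- B replaces A's explicit-stack DFS over the implicit array heap with the
-- closed-form range check 0 <= target < size (asymptotically faster: O(1) vs O(size)).


-- ===== PORT A =====
-- The while loop, stack top at the head of the list (Python's st.pop() pops the
-- last appended element; 'append r then l' therefore makes l the next popped).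
-- The Nat fuel only makes the loop total; 2^size.toNat iterations always suffice
-- (proved below via the weight measure dfsW).
def dfsLoop (size target : Int) : List Int → Nat → Bool
  | [], _ => false
  | _ :: _, 0 => false
  | i :: rest, Nat.succ f =>
    if i = target then true
    else dfsLoop size target
      ((if 2*i+1 < size then [2*i+1] else []) ++
       (if 2*i+2 < size then [2*i+2] else []) ++ rest) f

def dfs (size : Int) (target : Int) : Bool :=
  if size = 0 then false
  else dfsLoop size target [0] (2 ^ size.toNat)

-- ===== PORT B =====
def dfs_alt (size : Int) (target : Int) : Bool :=
  decide (0 ≤ target ∧ target < size)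

-- ===== PRECONDITION & SPEC =====
-- On size < 0 with target = 0, A returns True — its seed stack [0] pops the root
-- even though the heap has no nodes at all — while B returns False, the intended
-- answer: no node is reachable in an empty (or negative-size) heap.
def D_dfs (size : Int) (target : Int) : Prop := size < 0 ∧ target = 0
instance (size : Int) (target : Int) : Decidable (D_dfs size target) := by unfold D_dfs; infer_instance

def Spec_dfs (size : Int) (target : Int) (out : Bool) : Prop := ¬ D_dfs size target → out = dfs_alt size target
instance (size : Int) (target : Int) (out : Bool) : Decidable (Spec_dfs size target out) := by unfold Spec_dfs; infer_instance

def pvDiffWitness_dfs : Int × Int := (-1, 0)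
def pvDiffWitnessOut_dfs : Bool × Bool := (true, false)

-- ===== CLAIM (what is proved, stated in full; the proofs are below) =====
def Claim_unchanged_dfs : Prop := ∀ (size : Int) (target : Int), Dom_dfs size target → Spec_dfs size target (dfs size target)
def Claim_changed_dfs : Prop := Dom_dfs (pvDiffWitness_dfs.1) (pvDiffWitness_dfs.2) ∧ D_dfs (pvDiffWitness_dfs.1) (pvDiffWitness_dfs.2) ∧ dfs (pvDiffWitness_dfs.1) (pvDiffWitness_dfs.2) = pvDiffWitnessOut_dfs.1 ∧ dfs_alt (pvDiffWitness_dfs.1) (pvDiffWitness_dfs.2) = pvDiffWitnessOut_dfs.2 ∧ pvDiffWitnessOut_dfs.1 ≠ pvDiffWitnessOut_dfs.2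
def Claim_exact_dfs : Prop := ∀ (size : Int) (target : Int), Dom_dfs size target → D_dfs size target → dfs size target ≠ dfs_alt size target

-- ===== LEMMAS AND PROOFS =====

-- weight of a stack: fuel upper bound for the remaining loop iterations
def dfsW (size : Int) (st : List Int) : Nat :=
  (st.map (fun i => 2 ^ (size - i).toNat)).sum

-- "t is in the subtree rooted at i" in the implicit heap (indices as Nats)
def isDesc (i t : Nat) : Bool :=
  if t ≤ i then t == i else isDesc i ((t - 1) / 2)
termination_by t
decreasing_by omega

theorem isDesc_le {i t : Nat} (h : isDesc i t = true) : i ≤ t := by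
  induction t using Nat.strong_induction_on with
  | _ t ih =>
      unfold isDesc at h
      by_cases hle : t ≤ i
      · simp [hle] at h; omega
      · simp [hle] at h
        have := ih ((t - 1) / 2) (by omega) h
        omega

theorem isDesc_zero (t : Nat) : isDesc 0 t = true := by
  induction t using Nat.strong_induction_on with
  | _ t ih =>
      unfold isDesc
      by_cases h : t ≤ 0
      · simp [h]; omega
      · simp [h]; exact ih _ (by omega)

theorem isDesc_self (t : Nat) : isDesc t t = true := by
  unfold isDesc; simp

-- from a strict ancestor i of t, one of i's children is still an ancestor of t
theorem isDesc_step {i t : Nat} (hlt : i < t) (h : isDesc i t = true) :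
    (2*i+1 ≤ t ∧ isDesc (2*i+1) t = true) ∨ (2*i+2 ≤ t ∧ isDesc (2*i+2) t = true) := by
  induction t using Nat.strong_induction_on with
  | _ t ih =>
      unfold isDesc at h
      have hle : ¬ t ≤ i := by omega
      simp [hle] at h
      set p := (t - 1) / 2 with hp
      by_cases hpi : p = i
      · -- t is a direct child of i
        have ht : t = 2*i+1 ∨ t = 2*i+2 := by omega
        rcases ht with ht | ht
        · exact Or.inl ⟨by omega, by rw [← ht]; exact isDesc_self t⟩
        · exact Or.inr ⟨by omega, by rw [← ht]; exact isDesc_self t⟩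
      · have hip : i < p := lt_of_le_of_ne (isDesc_le h) (fun e => hpi e.symm)
        have hpt : p < t := by omega
        rcases ih p hpt hip h with ⟨hc, hd⟩ | ⟨hc, hd⟩
        · refine Or.inl ⟨by omega, ?_⟩
          unfold isDesc
          have : ¬ t ≤ 2*i+1 := by omega
          simp [this]; exact hd
        · refine Or.inr ⟨by omega, ?_⟩
          unfold isDesc
          have : ¬ t ≤ 2*i+2 := by omega
          simp [this]; exact hd

-- invariant on the stack: every element is a valid heap index
def dfsInv (size : Int) (st : List Int) : Prop := ∀ i ∈ st, 0 ≤ i ∧ i < size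

theorem dfsInv_next {size i : Int} {rest : List Int}
    (h : dfsInv size (i :: rest)) :
    dfsInv size ((if 2*i+1 < size then [2*i+1] else []) ++
                 (if 2*i+2 < size then [2*i+2] else []) ++ rest) := by
  have hi := h i (List.mem_cons_self ..)
  intro j hj
  simp only [List.mem_append] at hj
  rcases hj with (hj | hj) | hj
  · split_ifs at hj with hc <;> simp at hj
    exact ⟨by omega, by omega⟩
  · split_ifs at hj with hc <;> simp at hj
    exact ⟨by omega, by omega⟩
  · exact h j (List.mem_cons_of_mem _ hj)

-- the weight strictly decreases at each loop iteration
theorem dfsW_next {size i : Int} {rest : List Int} (h0 : 0 ≤ i) (hs : i < size) :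
    dfsW size ((if 2*i+1 < size then [2*i+1] else []) ++
               (if 2*i+2 < size then [2*i+2] else []) ++ rest) < dfsW size (i :: rest) := by
  unfold dfsW
  simp only [List.map_append, List.sum_append, List.map_cons, List.sum_cons]
  have key : ((if 2*i+1 < size then [2*i+1] else []).map (fun j => 2 ^ (size - j).toNat)).sum +
      ((if 2*i+2 < size then [2*i+2] else []).map (fun j => 2 ^ (size - j).toNat)).sum <
      2 ^ (size - i).toNat := by
    have hk : 1 ≤ (size - i).toNat := by omega
    split_ifs with h1 h2 h2
    · -- both children
      simp only [List.map_cons, List.map_nil, List.sum_cons, List.sum_nil]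
      have e1 : (size - (2*i+1)).toNat ≤ (size - i).toNat - 1 := by omega
      have e2 : (size - (2*i+2)).toNat ≤ (size - i).toNat - 2 := by omega
      have k2 : 2 ≤ (size - i).toNat := by omega
      calc 2 ^ (size - (2*i+1)).toNat + 0 + 2 ^ (size - (2*i+2)).toNat + 0
          ≤ 2 ^ ((size - i).toNat - 1) + 0 + 2 ^ ((size - i).toNat - 2) + 0 := by
            have := Nat.pow_le_pow_right (by norm_num : 1 ≤ 2) e1
            have := Nat.pow_le_pow_right (by norm_num : 1 ≤ 2) e2
            omega
        _ < 2 ^ (size - i).toNat := by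
            have h1' : 2 ^ ((size - i).toNat - 1) * 2 = 2 ^ (size - i).toNat := by
              rw [← Nat.pow_succ]; congr 1; omega
            have h2' : 2 ^ ((size - i).toNat - 2) < 2 ^ ((size - i).toNat - 1) :=
              Nat.pow_lt_pow_right (by norm_num) (by omega)
            omega
    · -- only left child
      simp only [List.map_cons, List.map_nil, List.sum_cons, List.sum_nil]
      have e1 : (size - (2*i+1)).toNat ≤ (size - i).toNat - 1 := by omega
      have := Nat.pow_le_pow_right (by norm_num : 1 ≤ 2) e1
      have h1' : 2 ^ ((size - i).toNat - 1) * 2 = 2 ^ (size - i).toNat := by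
        rw [← Nat.pow_succ]; congr 1; omega
      have hp : 1 ≤ 2 ^ ((size - i).toNat - 1) := Nat.one_le_two_pow
      omega
    · -- only right child (impossible: r < size → l < size), handled uniformly anyway
      simp only [List.map_cons, List.map_nil, List.sum_cons, List.sum_nil]
      omega
    · -- no children
      simp only [List.map_nil, List.sum_nil]
      have : 1 ≤ 2 ^ (size - i).toNat := Nat.one_le_two_pow
      omega
  omega

-- if the loop returns true, the target is a valid heap index
theorem dfsLoop_sound (size target : Int) :
    ∀ (fuel : Nat) (st : List Int), dfsInv size st →
      dfsLoop size target st fuel = true → 0 ≤ target ∧ target < size := by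
  intro fuel
  induction fuel with
  | zero =>
      intro st hinv h
      cases st with
      | nil => simp [dfsLoop] at h
      | cons i rest => simp [dfsLoop] at h
  | succ f ih =>
      intro st hinv h
      cases st with
      | nil => simp [dfsLoop] at h
      | cons i rest =>
          unfold dfsLoop at h
          by_cases hit : i = target
          · have := hinv i (List.mem_cons_self ..); omega
          · simp [hit] at h
            rw [← List.append_assoc] at h
            exact ih _ (dfsInv_next hinv) h

-- if the target is a valid heap index below some stack element's subtree,
-- the loop (with enough fuel) finds it
theorem dfsLoop_complete (size target : Int) :
    ∀ (fuel : Nat) (st : List Int), dfsInv size st → dfsW size st ≤ fuel →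
      0 ≤ target → target < size →
      (∃ i ∈ st, isDesc i.toNat target.toNat = true) →
      dfsLoop size target st fuel = true := by
  intro fuel
  induction fuel with
  | zero =>
      intro st hinv hw _ _ hex
      rcases hex with ⟨i, hi, _⟩
      cases st with
      | nil => simp at hi
      | cons j rest =>
          exfalso
          have : 1 ≤ dfsW size (j :: rest) := by
            unfold dfsW
            simp only [List.map_cons, List.sum_cons]
            have : 1 ≤ 2 ^ (size - j).toNat := Nat.one_le_two_pow
            omega
          omega
  | succ f ih =>
      intro st hinv hw ht0 hts hex
      cases st with
      | nil => rcases hex with ⟨i, hi, _⟩; simp at hi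
      | cons i rest =>
          unfold dfsLoop
          by_cases hit : i = target
          · simp [hit]
          · simp only [hit, if_false]
            have hi := hinv i (List.mem_cons_self ..)
            have hwnext : dfsW size ((if 2*i+1 < size then [2*i+1] else []) ++
                (if 2*i+2 < size then [2*i+2] else []) ++ rest) ≤ f := by
              have := dfsW_next (size := size) (rest := rest) hi.1 hi.2
              omega
            apply ih _ (dfsInv_next hinv) hwnext ht0 hts
            rcases hex with ⟨j, hj, hd⟩
            rcases List.mem_cons.mp hj with rfl | hjr
            · -- the popped element is the ancestor: descend to a child
              have hne : j.toNat ≠ target.toNat := by omega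
              have hlt : j.toNat < target.toNat :=
                lt_of_le_of_ne (isDesc_le hd) hne
              rcases isDesc_step hlt hd with ⟨hc, hcd⟩ | ⟨hc, hcd⟩
              · refine ⟨2*j+1, ?_, ?_⟩
                · have hcs : 2*j+1 < size := by omega
                  simp [hcs]
                · have : (2*j+1).toNat = 2 * j.toNat + 1 := by omega
                  rw [this]; exact hcd
              · refine ⟨2*j+2, ?_, ?_⟩
                · have hcs : 2*j+2 < size := by omega
                  simp [hcs]
                · have : (2*j+2).toNat = 2 * j.toNat + 2 := by omega
                  rw [this]; exact hcd
            · exact ⟨j, by simp [hjr], hd⟩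

-- ===== VERDICT (by name: the statement is the Claim_ definition above) =====
theorem dfs_spec : Claim_unchanged_dfs := by
  unfold Claim_unchanged_dfs
  intro size target _
  unfold Spec_dfs D_dfs
  intro hd
  have hpre : 0 ≤ size ∨ target ≠ 0 := by
    by_cases h : 0 ≤ size
    · exact Or.inl h
    · exact Or.inr (fun e => hd ⟨by omega, e⟩)
  unfold dfs dfs_alt
  by_cases hz : size = 0
  · simp [hz]
  · simp only [hz, if_false]
    by_cases hneg : size < 0
    · -- negative size, target ≠ 0: one pop of the root, no pushes, loop ends False
      have ht : target ≠ 0 := by omega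
      have hfuel : 2 ^ size.toNat = 1 := by
        have : size.toNat = 0 := by omega
        simp [this]
      rw [hfuel]
      have h1 : ¬ (2*(0:Int)+1 < size) := by omega
      have h2 : ¬ (2*(0:Int)+2 < size) := by omega
      have hres : dfsLoop size target [0] 1 = false := by
        unfold dfsLoop
        simp only [Ne.symm ht, if_false, h1, h2, List.nil_append]
        rfl
      rw [hres]
      have hno : ¬ (0 ≤ target ∧ target < size) := by omega
      simp [hno]
    have hpos : 0 < size := by omega
    have hinv : dfsInv size [0] := by
      intro i hi; simp at hi; omega
    by_cases hin : 0 ≤ target ∧ target < size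
    · have : dfsLoop size target [0] (2 ^ size.toNat) = true := by
        apply dfsLoop_complete size target _ _ hinv _ hin.1 hin.2
        · exact ⟨0, by simp, by simpa using isDesc_zero target.toNat⟩
        · unfold dfsW; simp
      rw [this]
      simp [hin]
    · have : dfsLoop size target [0] (2 ^ size.toNat) ≠ true := by
        intro h
        exact hin (dfsLoop_sound size target _ _ hinv h)
      have hfalse : dfsLoop size target [0] (2 ^ size.toNat) = false := by
        cases h : dfsLoop size target [0] (2 ^ size.toNat) with
        | true => exact absurd h this
        | false => rfl
      rw [hfalse]
      simp [hin]

theorem dfs_changed : Claim_changed_dfs := by unfold Claim_changed_dfs; decide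

theorem dfs_tight : Claim_exact_dfs := by
  unfold Claim_exact_dfs D_dfs
  intro size target _ hd
  obtain ⟨hneg, rfl⟩ := hd
  have hz : size ≠ 0 := by omega
  have ht : size.toNat = 0 := by omega
  have hA : dfs size 0 = true := by
    unfold dfs
    simp only [hz, if_false, ht, pow_zero]
    unfold dfsLoop
    simp
  have hB : dfs_alt size 0 = false := by
    unfold dfs_alt
    have : ¬ ((0:Int) < size) := by omega
    simp [this]
  rw [hA, hB]
  simp
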